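-- pv_equiv track=rewrite | github.com/Jooc/LeetCode | python-version/leetcode/Solution_929.py | numUniqueEmails_0
-- ===== SOURCE A (Python) =====
-- from typing import List
--
-- def numUniqueEmails_0(emails: List[str]) -> int:
--     record = dict()
--
--     for email in emails:
--         local_name, net_name = email.split('@')[0], email.split('@')[1]
--         local_name = local_name.split('+')[0]
--         local_name = local_name.replace('.', '')
--         if local_name in record.keys():
--             record[local_name].add(net_name)
--         else:
--             record[local_name] = set([net_name])
--
--     return sum([len(result_set) for result_set in record.values()])
-- ===== SOURCE B (Python) =====
-- def numUniqueEmails_0(emails):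
--     # stage 1: normalize every email into a (local, domain) pair
--     norms = [(e.split('@')[0].split('+')[0].replace('.', ''), e.split('@')[1])
--              for e in emails]
--     # stage 2: count last occurrences -- a pair is unique iff it never recurs later;
--     # no dict/set bookkeeping at all, just a membership scan of the remainder
--     count = 0
--     while norms:
--         p = norms.pop(0)
--         if p not in norms:
--             count += 1
--     return count
-- ===== Notes on version B (the rewrite author's own statement) =====
-- stated objective: alternative
-- what changed: replaces A's single-pass dict-of-sets grouping (insert-or-extend branch plus a final sum of group sizes) by a two-stage structure-free algorithm: first a normalization pass building the list of (local, domain) pairs, then a quadratic scan that counts each pair that does not recur later (last occurrences), with no auxiliary set or dict; it trades A's hashing bookkeeping for plain list membership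
import Mathlib
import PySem

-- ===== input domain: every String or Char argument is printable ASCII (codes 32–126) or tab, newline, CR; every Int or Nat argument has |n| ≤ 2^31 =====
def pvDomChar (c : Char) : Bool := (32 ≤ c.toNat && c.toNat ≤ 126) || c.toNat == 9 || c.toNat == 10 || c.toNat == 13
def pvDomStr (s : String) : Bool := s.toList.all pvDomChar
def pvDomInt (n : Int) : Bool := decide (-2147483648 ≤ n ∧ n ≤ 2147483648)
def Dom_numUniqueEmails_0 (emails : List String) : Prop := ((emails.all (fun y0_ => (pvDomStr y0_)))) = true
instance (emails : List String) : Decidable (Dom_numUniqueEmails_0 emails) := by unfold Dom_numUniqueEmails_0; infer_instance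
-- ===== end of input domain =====

-- B drops A's dict-of-sets grouping (insert-or-extend branch, sum over group sizes) for a
-- two-stage, structure-free algorithm: normalize all emails into a list of (local, domain)
-- pairs, then count the pairs that do not recur later in the list (last occurrences).

-- shared normalization of one email, exactly the Python lines both programs contain
-- local = email.split('@')[0].split('+')[0].replace('.', ''); net = email.split('@')[1]
-- ([1] is an IndexError when the email has no '@': excluded by Pre_, the .getD "" is never reached there inside Pre_)
def pvNorm (email : String) : String × String :=
  let parts := (PySem.Str.split? email "@").getD []
  let localName := (PySem.List.pyGet? parts 0).getD ""
  let netName := (PySem.List.pyGet? parts 1).getD ""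
  let localName := (PySem.List.pyGet? ((PySem.Str.split? localName "+").getD []) 0).getD ""
  (PySem.Str.replace localName "." "", netName)

-- ===== PORT A =====
def numUniqueEmails_0 (emails : List String) : Int :=
  let record := emails.foldl (fun d email =>
    let p := pvNorm email
    if d.contains p.1 then
      d.insert p.1 (PySem.Set.add (d.getD p.1 []) p.2)      -- record[local].add(net)
    else
      d.insert p.1 (PySem.Set.ofList [p.2]))                -- record[local] = set([net])
    (PySem.Dict.empty : PySem.Dict String (PySem.Set String))
  ((record.values).map (fun resultSet => PySem.Set.len resultSet)).sum

-- ===== PORT B =====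
-- the 'while norms: p = norms.pop(0); if p not in norms: count += 1' loop:
-- pop(0) takes the head, the membership test runs over the remaining tail
def pvCountLoop : List (String × String) → Int → Int
  | [], count => count
  | p :: rest, count => pvCountLoop rest (if p ∈ rest then count else count + 1)

def numUniqueEmails_0_alt (emails : List String) : Int :=
  let norms := emails.map (fun e => pvNorm e)
  pvCountLoop norms 0

-- ===== PRECONDITION & SPEC =====
-- Pre_ excludes exactly the emails without '@', on which A's email.split('@')[1] raises IndexError.
def Pre_numUniqueEmails_0 (emails : List String) : Prop :=
  ∀ e ∈ emails, PySem.Str.isIn "@" e = true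
instance (emails : List String) : Decidable (Pre_numUniqueEmails_0 emails) := by
  unfold Pre_numUniqueEmails_0; infer_instance
def pvWitness_numUniqueEmails_0 : List String :=
  ["a.b+x@leetcode.com", "ab@leetcode.com", "ab@le.etcode.com"]
def Spec_numUniqueEmails_0 (emails : List String) (out : Int) : Prop := out = numUniqueEmails_0_alt emails
instance (emails : List String) (out : Int) : Decidable (Spec_numUniqueEmails_0 emails out) := by unfold Spec_numUniqueEmails_0; infer_instance

-- ===== CLAIM (what is proved, stated in full; the proofs are below) =====
def Claim_equal_numUniqueEmails_0 : Prop := ∀ (emails : List String), Dom_numUniqueEmails_0 emails → Pre_numUniqueEmails_0 emails → Spec_numUniqueEmails_0 emails (numUniqueEmails_0 emails)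

-- ===== LEMMAS AND PROOFS =====

-- the invariant tying A's dict-of-sets to a flat set of (local, domain) pairs:
-- nodup keys, same membership, and A's total group size = the flat set's size
def pvInv (d : PySem.Dict String (PySem.Set String)) (s : PySem.Set (String × String)) : Prop :=
  d.keys.Nodup ∧
  (∀ k n, n ∈ d.getD k [] ↔ (k, n) ∈ s) ∧
  ((d.values).map (fun v => PySem.Set.len v)).sum = PySem.Set.len s

lemma pvInv_empty : pvInv PySem.Dict.empty PySem.Set.empty := by
  refine ⟨by simp [pysem], ?_, ?_⟩
  · intro k n
    simp [pysem, PySem.Set.empty]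
  · simp [PySem.Dict.values, PySem.Dict.empty, PySem.Set.len, PySem.Set.empty]

-- overwriting a present key with the same value does not change the dict
lemma pvInsert_getD_self (d : PySem.Dict String (PySem.Set String)) (k : String)
    (hc : d.contains k = true) (hnd : d.keys.Nodup) :
    d.insert k (d.getD k []) = d := by
  apply PySem.Dict.ext
  rw [PySem.Dict.items_insert_of_contains d _ hc]
  conv_rhs => rw [← List.map_id d.items]
  apply List.map_congr_left
  intro p hp
  by_cases hk : (p.1 == k) = true
  · have h1 : p.1 = k := by simpa using hk
    have h2 : d.getD p.1 [] = p.2 :=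
      PySem.Dict.getD_of_mem_items d (by simpa using hp) hnd []
    simp [← h1, h2]
  · simp [hk]

-- sum of value sizes after an overwrite at a present key
lemma pvSum_replace (l : List (String × PySem.Set String)) (k : String)
    (v old : PySem.Set String) (hmem : (k, old) ∈ l) (hnd : (l.map (·.1)).Nodup) :
    ((l.map (fun p => if (p.1 == k) = true then (k, v) else p)).map (fun p => PySem.Set.len p.2)).sum + PySem.Set.len old
      = (l.map (fun p => PySem.Set.len p.2)).sum + PySem.Set.len v := by
  induction l with
  | nil => cases hmem
  | cons p rest ih =>
      have hnotin : p.1 ∉ rest.map (·.1) := (List.nodup_cons.mp hnd).1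
      have hndr : (rest.map (·.1)).Nodup := (List.nodup_cons.mp hnd).2
      rcases List.mem_cons.mp hmem with hp | hp
      · have hk : (p.1 == k) = true := by rw [← hp]; simp
        have hrest : rest.map (fun q => if (q.1 == k) = true then (k, v) else q) = rest := by
          conv_rhs => rw [← List.map_id rest]
          apply List.map_congr_left
          intro q hq
          have hk1 : p.1 = k := by rw [← hp]
          have : q.1 ≠ k := by
            intro he
            exact hnotin (by rw [hk1, ← he]; exact List.mem_map_of_mem hq)
          simp [this]
        have hold : p.2 = old := by rw [← hp]
        simp only [List.map_cons, hk, if_true, hrest, List.sum_cons, hold]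
        ring
      · have hk : (p.1 == k) = false := by
          have : p.1 ≠ k := by
            intro he
            exact hnotin (by rw [he]; exact List.mem_map_of_mem hp)
          simpa using this
        simp only [List.map_cons, hk, Bool.false_eq_true, if_false, List.sum_cons]
        have := ih hp hndr
        omega

-- one step of A's loop and of the flat-set fold preserves the invariant
lemma pvInv_step (d : PySem.Dict String (PySem.Set String)) (s : PySem.Set (String × String))
    (h : pvInv d s) (k n : String) :
    pvInv (if d.contains k then d.insert k (PySem.Set.add (d.getD k []) n)
           else d.insert k (PySem.Set.ofList [n]))
          (PySem.Set.add s (k, n)) := by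
  obtain ⟨hnd, hmem, hsum⟩ := h
  by_cases hin : (k, n) ∈ s
  · have hn : n ∈ d.getD k [] := (hmem k n).mpr hin
    have hc : d.contains k = true := by
      by_contra hcf
      rw [PySem.Dict.getD_of_not_contains d [] (Bool.not_eq_true _ ▸ hcf)] at hn
      cases hn
    rw [PySem.Set.add_of_mem hin, if_pos hc, PySem.Set.add_of_mem hn,
      pvInsert_getD_self d k hc hnd]
    exact ⟨hnd, hmem, hsum⟩
  · have hn : n ∉ d.getD k [] := fun hx => hin ((hmem k n).mp hx)
    rw [PySem.Set.add_of_not_mem hin]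
    by_cases hc : d.contains k = true
    · have hv : PySem.Set.add (d.getD k []) n = d.getD k [] ++ [n] :=
        PySem.Set.add_of_not_mem hn
      rw [if_pos hc, hv]
      refine ⟨PySem.Dict.nodup_keys_insert d k _ hnd, ?_, ?_⟩
      · intro k' n'
        rw [PySem.Dict.getD_insert]
        by_cases hk' : k' = k
        · subst hk'
          simp [hmem k' n']
        · simp [hk', hmem k' n']
      · obtain ⟨w, hw⟩ : ∃ w, d.get? k = some w := by
          have := PySem.Dict.contains_eq_isSome_get? d k
          rw [hc] at this
          exact Option.isSome_iff_exists.mp this.symm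
        have hwD : d.getD k [] = w := PySem.Dict.getD_of_get?_eq_some d [] hw
        have hkm : (k, w) ∈ d.items := PySem.Dict.mem_items_of_get?_eq_some d hw
        have hrep := pvSum_replace d.items k (d.getD k [] ++ [n]) w
          hkm (by simpa [PySem.Dict.keys] using hnd)
        simp only [PySem.Dict.values, PySem.Dict.items_insert_of_contains d _ hc]
        simp only [PySem.Dict.values] at hsum
        rw [hwD] at hrep ⊢
        simp only [PySem.Set.len, List.length_append, List.map_map, Function.comp_def, List.length_singleton] at hrep hsum ⊢
        omega
    · have hc' : d.contains k = false := Bool.not_eq_true _ ▸ hc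
      have hD : d.getD k [] = [] := PySem.Dict.getD_of_not_contains d [] hc'
      rw [if_neg hc]
      refine ⟨PySem.Dict.nodup_keys_insert d k _ hnd, ?_, ?_⟩
      · intro k' n'
        rw [PySem.Dict.getD_insert]
        by_cases hk' : k' = k
        · subst hk'
          have : ∀ n', (k', n') ∉ s := fun n' hx => by
            have := (hmem k' n').mpr hx
            rw [hD] at this
            cases this
          simp [PySem.Set.ofList, PySem.Set.add, this]
        · simp [hk', hmem k' n']
      · simp only [PySem.Dict.values, PySem.Dict.items_insert_of_not_contains d _ hc']
        simp only [PySem.Dict.values] at hsum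
        simp only [PySem.Set.len, PySem.Set.ofList, List.map_append,
          List.length_append] at hsum ⊢
        simp_all

-- A's fold stays related to the flat-set fold over any email list
lemma pvInv_foldl (emails : List String) :
    ∀ (d : PySem.Dict String (PySem.Set String)) (s : PySem.Set (String × String)), pvInv d s →
    pvInv (emails.foldl (fun d email =>
            let p := pvNorm email
            if d.contains p.1 then d.insert p.1 (PySem.Set.add (d.getD p.1 []) p.2)
            else d.insert p.1 (PySem.Set.ofList [p.2])) d)
          (emails.foldl (fun s email => PySem.Set.add s (pvNorm email)) s) := by
  induction emails with
  | nil => intro d s h; exact h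
  | cons e rest ih =>
      intro d s h
      simpa [List.foldl_cons] using ih _ _ (pvInv_step d s h (pvNorm e).1 (pvNorm e).2)

-- B's loop counts Mathlib's dedup (last occurrences)
lemma pvCountLoop_eq_dedup (l : List (String × String)) :
    ∀ c : Int, pvCountLoop l c = c + (l.dedup.length : Int) := by
  induction l with
  | nil => intro c; simp [pvCountLoop]
  | cons p rest ih =>
      intro c
      by_cases hp : p ∈ rest
      · rw [pvCountLoop, if_pos hp, ih, List.dedup_cons_of_mem hp]
      · rw [pvCountLoop, if_neg hp, ih, List.dedup_cons_of_notMem hp,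
          List.length_cons]
        push_cast
        ring

-- first-occurrence set and last-occurrence dedup have the same length
lemma pvOfList_length_eq_dedup (l : List (String × String)) :
    (PySem.Set.ofList l).length = l.dedup.length := by
  refine List.Perm.length_eq ?_
  refine (List.perm_ext_iff_of_nodup (PySem.Set.nodup_ofList l) l.nodup_dedup).mpr ?_
  intro a
  rw [PySem.Set.mem_ofList, List.mem_dedup]

-- ===== VERDICT (by name: the statement is the Claim_ definition above) =====
theorem numUniqueEmails_0_spec : Claim_equal_numUniqueEmails_0 := by
  intro emails _ _
  unfold Spec_numUniqueEmails_0 numUniqueEmails_0 numUniqueEmails_0_alt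
  have hA := (pvInv_foldl emails PySem.Dict.empty PySem.Set.empty pvInv_empty).2.2
  simp only [hA]
  rw [show (emails.foldl (fun s email => PySem.Set.add s (pvNorm email)) PySem.Set.empty)
        = PySem.Set.ofList (emails.map (fun e => pvNorm e)) from by
    rw [← PySem.Set.update_map_eq_foldl_add]
    exact PySem.Set.update_nil_left _]
  rw [pvCountLoop_eq_dedup, PySem.Set.len, pvOfList_length_eq_dedup]
  simp
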